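-- pv_equiv track=rewrite | github.com/ptrabosk/auto-qa-opt-outs | scripts/labels.py | can_be_composed_of_keywords
-- ===== SOURCE A (Python) =====
-- def can_be_composed_of_keywords(words, single_tokens, phrase_sequences):
--     if not words:
--         return False, []
--
--     matched_triggers = []
--     i = 0
--     while i < len(words):
--         token = words[i]
--         if token in single_tokens:
--             matched_triggers.append(token)
--             i += 1
--             continue
--
--         matched_phrase = None
--         for phrase_tokens in phrase_sequences:
--             phrase_len = len(phrase_tokens)
--             if phrase_len <= 1:
--                 continue
--             if tuple(words[i : i + phrase_len]) == phrase_tokens: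
--                 matched_phrase = phrase_tokens
--                 break
--
--         if matched_phrase is None:
--             return False, []
--
--         matched_triggers.append(" ".join(matched_phrase))
--         i += len(matched_phrase)
--
--     return True, list(dict.fromkeys(matched_triggers))
-- ===== SOURCE B (Python) =====
-- def can_be_composed_of_keywords(words, single_tokens, phrase_sequences):
--     if not words:
--         return False, []
--
--     n = len(words)
--     # Stage 1: precompute, for every position independently, the action A's
--     # greedy scan would take there: the single token if it is one, else the
--     # first multi-token phrase (in list order) matching at that position.
--     # Phrases are iterated in the OUTER loop, positions in the inner one.
--     action = [(w, 1) if w in single_tokens else None for w in words]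
--     for phrase in phrase_sequences:
--         k = len(phrase)
--         if k > 1:
--             for i in range(n):
--                 if action[i] is None and i + k <= n and _equal_at(words, i, phrase):
--                     action[i] = (" ".join(phrase), k)
--
--     # Stage 2: follow the chain of precomputed actions from position 0.
--     triggers = []
--     i = 0
--     while i < n:
--         step = action[i]
--         if step is None:
--             return False, []
--         triggers.append(step[0])
--         i += step[1]
--
--     return True, list(dict.fromkeys(triggers))
--
--
-- def _equal_at(words, i, phrase):
--     j = i
--     for t in phrase:
--         if words[j] != t:
--             return False
--         j += 1
--     return True
-- ===== Notes on version B (the rewrite author's own statement) =====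
-- stated objective: alternative
-- what changed: B is a two-stage algorithm: it first precomputes a per-position action table by iterating phrases in the outer loop (marking, for each position, the single token or the first multi-token phrase matching there), then follows the chain of actions from position 0; A instead is a single greedy scan that searches all phrases with a fresh tuple slice at each visited position.
import Mathlib
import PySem

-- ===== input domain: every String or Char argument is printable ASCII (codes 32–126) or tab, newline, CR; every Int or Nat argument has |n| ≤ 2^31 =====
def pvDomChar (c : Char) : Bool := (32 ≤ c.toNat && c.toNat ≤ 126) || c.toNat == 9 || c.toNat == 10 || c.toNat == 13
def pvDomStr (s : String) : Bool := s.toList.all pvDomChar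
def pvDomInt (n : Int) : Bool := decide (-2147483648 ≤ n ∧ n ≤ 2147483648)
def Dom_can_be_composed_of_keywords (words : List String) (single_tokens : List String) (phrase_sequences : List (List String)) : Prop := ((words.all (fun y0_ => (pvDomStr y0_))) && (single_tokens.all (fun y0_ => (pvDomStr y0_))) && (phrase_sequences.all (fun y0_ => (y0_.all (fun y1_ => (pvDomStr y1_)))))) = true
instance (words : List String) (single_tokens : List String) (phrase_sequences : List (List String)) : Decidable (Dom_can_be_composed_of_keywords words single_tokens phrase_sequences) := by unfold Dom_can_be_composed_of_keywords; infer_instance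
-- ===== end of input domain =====

-- B precomputes a per-position action table (phrases iterated in the outer loop) and then walks
-- the chain of actions, instead of A's single greedy scan with an inner phrase search; return
-- values proved equal on the whole domain.


-- ===== PORT A =====
-- inner 'for phrase_tokens in phrase_sequences: … break' loop: first phrase of length > 1
-- whose slice-comparison 'tuple(words[i : i + phrase_len]) == phrase_tokens' succeeds
def aFindPhrase (words : List String) (i : Nat) : List (List String) → Option (List String)
  | [] => none
  | p :: rest =>
    if p.length ≤ 1 then aFindPhrase words i rest
    else if PySem.List.slice words (some (i : Int)) (some ((i + p.length : Nat) : Int)) = p then some p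
    else aFindPhrase words i rest

-- termination fact the while-loop port cites: a matched phrase has length > 1
theorem aFindPhrase_some_len {words : List String} {i : Nat} {ps : List (List String)}
    {p : List String} (h : aFindPhrase words i ps = some p) : 1 < p.length := by
  induction ps with
  | nil => simp [aFindPhrase] at h
  | cons q rest ih =>
    simp only [aFindPhrase] at h
    split_ifs at h with h1 h2
    · exact ih h
    · cases h; omega
    · exact ih h

-- the 'while i < len(words)' loop of A
def aLoop (words : List String) (single_tokens : List String) (phrase_sequences : List (List String))
    (i : Nat) (acc : List String) : Option (List String) :=
  if h : i < words.length then
    let token := words[i]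
    if single_tokens.contains token then
      aLoop words single_tokens phrase_sequences (i + 1) (acc ++ [token])
    else
      match hm : aFindPhrase words i phrase_sequences with
      | none => none
      | some p => aLoop words single_tokens phrase_sequences (i + p.length) (acc ++ [PySem.Str.join " " p])
  else some acc
termination_by words.length - i
decreasing_by
  · omega
  · have := aFindPhrase_some_len hm; omega

def can_be_composed_of_keywords (words : List String) (single_tokens : List String) (phrase_sequences : List (List String)) : Bool × List String :=
  if words = [] then (false, [])
  else
    match aLoop words single_tokens phrase_sequences 0 [] with
    | none => (false, [])
    | some acc => (true, PySem.List.dedup acc)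

-- ===== PORT B =====
-- _equal_at: the 'for t in phrase' scan with running index j
def bScan (words : List String) (j : Nat) : List String → Bool
  | [] => true
  | t :: rest => (words.getD j "" == t) && bScan words (j + 1) rest

-- the inner 'for i in range(n)' pass of stage 1 for one phrase (in-place, per-position update)
def bMark (words : List String) (p : List String)
    (action : List (Option (String × Nat))) : List (Option (String × Nat)) :=
  action.mapIdx (fun i a =>
    match a with
    | some x => some x
    | none =>
      if i + p.length ≤ words.length && bScan words i p then
        some (PySem.Str.join " " p, p.length)
      else none)

-- stage 1: initial comprehension over words, then the 'for phrase in phrase_sequences' loop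
def bTable (words : List String) (single_tokens : List String)
    (phrase_sequences : List (List String)) : List (Option (String × Nat)) :=
  phrase_sequences.foldl
    (fun action phrase => if 1 < phrase.length then bMark words phrase action else action)
    (words.map (fun w => if single_tokens.contains w then some (w, 1) else none))

-- stage 2: the 'while i < n' chain walk; fuel only makes the recursion structural (every stored
-- step length is ≥ 1, so fuel = n + 1 is never exhausted)
def bWalk (table : List (Option (String × Nat))) (i : Nat) (acc : List String) :
    Nat → Option (List String)
  | 0 => none
  | fuel + 1 =>
    if i < table.length then
      match table.getD i none with
      | none => none
      | some (t, k) => bWalk table (i + k) (acc ++ [t]) fuel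
    else some acc

def can_be_composed_of_keywords_alt (words : List String) (single_tokens : List String) (phrase_sequences : List (List String)) : Bool × List String :=
  if words = [] then (false, [])
  else
    match bWalk (bTable words single_tokens phrase_sequences) 0 [] (words.length + 1) with
    | none => (false, [])
    | some acc => (true, PySem.List.dedup acc)

-- ===== PRECONDITION & SPEC =====
def Spec_can_be_composed_of_keywords (words : List String) (single_tokens : List String) (phrase_sequences : List (List String)) (out : Bool × List String) : Prop := out = can_be_composed_of_keywords_alt words single_tokens phrase_sequences
instance (words : List String) (single_tokens : List String) (phrase_sequences : List (List String)) (out : Bool × List String) : Decidable (Spec_can_be_composed_of_keywords words single_tokens phrase_sequences out) := by unfold Spec_can_be_composed_of_keywords; infer_instance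

-- ===== CLAIM (what is proved, stated in full; the proofs are below) =====
def Claim_equal_can_be_composed_of_keywords : Prop := ∀ (words : List String) (single_tokens : List String) (phrase_sequences : List (List String)), Dom_can_be_composed_of_keywords words single_tokens phrase_sequences → Spec_can_be_composed_of_keywords words single_tokens phrase_sequences (can_be_composed_of_keywords words single_tokens phrase_sequences)

-- ===== LEMMAS AND PROOFS =====

-- the element scan agrees with list slicing when the phrase fits
theorem bScan_iff (words : List String) (p : List String) :
    ∀ i, i + p.length ≤ words.length →
      (bScan words i p = true ↔ (words.drop i).take p.length = p) := by
  induction p with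
  | nil => intro i h; simp [bScan]
  | cons t rest ih =>
    intro i h
    have hi : i < words.length := by simp at h; omega
    rw [List.drop_eq_getElem_cons hi]
    simp only [bScan, List.length_cons, List.take_succ_cons, Bool.and_eq_true, beq_iff_eq,
      List.getD_eq_getElem words "" hi, List.cons.injEq]
    constructor
    · rintro ⟨h1, h2⟩
      exact ⟨h1, ((ih (i+1) (by simp at h ⊢; omega)).mp h2)⟩
    · rintro ⟨h1, h2⟩
      exact ⟨h1, ((ih (i+1) (by simp at h ⊢; omega)).mpr h2)⟩

-- A's slice comparison equals B's bounds-check + element scan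
theorem matches_iff (words : List String) (i : Nat) (p : List String) (hp : 0 < p.length) :
    ((words.drop i).take p.length = p) ↔
      (decide (i + p.length ≤ words.length) && bScan words i p) = true := by
  by_cases h : i + p.length ≤ words.length
  · simp only [h, decide_true, Bool.true_and]
    exact (bScan_iff words p i h).symm
  · have hne : ¬ ((words.drop i).take p.length = p) := by
      intro he
      have := congrArg List.length he
      simp at this
      omega
    simp [h, hne]

theorem slice_eq (words p : List String) (i : Nat) :
    PySem.List.slice words (some (i : Int)) (some ((i + p.length : Nat) : Int))
      = (words.drop i).take p.length := by
  rw [PySem.List.slice_natCast]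
  congr 1
  omega

-- phrase-marking preserves the table's length
theorem bMark_length (words p : List String) (action : List (Option (String × Nat))) :
    (bMark words p action).length = action.length := by
  simp [bMark]

theorem fold_mark_length (words : List String) (ps : List (List String)) :
    ∀ (init : List (Option (String × Nat))),
      (ps.foldl (fun action phrase => if 1 < phrase.length then bMark words phrase action else action) init).length = init.length := by
  induction ps with
  | nil => intro init; rfl
  | cons p rest ih =>
    intro init
    simp only [List.foldl_cons]
    split_ifs
    · rw [ih (bMark words p init), bMark_length]
    · exact ih init

theorem bTable_length (words single_tokens : List String) (ps : List (List String)) :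
    (bTable words single_tokens ps).length = words.length := by
  unfold bTable
  rw [fold_mark_length]
  simp

-- entry i of the table after folding the phrase list: the initial entry, else the first
-- matching multi-token phrase — each position's entry is independent of the others
theorem fold_mark_getD (words : List String) (ps : List (List String)) :
    ∀ (init : List (Option (String × Nat))), ∀ i, i < init.length →
      (ps.foldl (fun action phrase => if 1 < phrase.length then bMark words phrase action else action) init).getD i none
        = match init.getD i none with
          | some x => some x
          | none => (aFindPhrase words i ps).map (fun p => (PySem.Str.join " " p, p.length)) := by
  induction ps with
  | nil =>
    intro init i hi
    simp only [List.foldl_nil, aFindPhrase]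
    cases init.getD i none <;> rfl
  | cons p rest ih =>
    intro init i hi
    simp only [List.foldl_cons]
    by_cases h1 : 1 < p.length
    · rw [if_pos h1]
      have hlen : i < (bMark words p init).length := by rw [bMark_length]; exact hi
      rw [ih (bMark words p init) i hlen]
      have hmark : (bMark words p init).getD i none
          = match init.getD i none with
            | some x => some x
            | none =>
              if (decide (i + p.length ≤ words.length) && bScan words i p) = true then
                some (PySem.Str.join " " p, p.length)
              else none := by
        unfold bMark
        rw [List.getD_eq_getElem _ _ (by simpa [bMark] using hi),
            List.getElem_mapIdx, List.getD_eq_getElem _ _ hi]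
      rw [hmark]
      cases hinit : init.getD i none with
      | some x => rfl
      | none =>
        simp only [aFindPhrase]
        rw [if_neg (show ¬ p.length ≤ 1 by omega), slice_eq words p i]
        by_cases hm : (decide (i + p.length ≤ words.length) && bScan words i p) = true
        · rw [if_pos hm, if_pos ((matches_iff words i p (by omega)).mpr hm)]
          rfl
        · rw [if_neg hm, if_neg (fun hc => hm ((matches_iff words i p (by omega)).mp hc))]
    · rw [if_neg h1, ih init i hi]
      simp only [aFindPhrase]
      rw [if_pos (by omega)]

-- the table's entry at a visited position is exactly A's per-position decision
theorem bTable_getD (words single_tokens : List String) (ps : List (List String))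
    (i : Nat) (hi : i < words.length) :
    (bTable words single_tokens ps).getD i none
      = if single_tokens.contains words[i] then some (words[i], 1)
        else (aFindPhrase words i ps).map (fun p => (PySem.Str.join " " p, p.length)) := by
  unfold bTable
  rw [fold_mark_getD words ps _ i (by simpa using hi)]
  rw [List.getD_eq_getElem _ _ (by simpa using hi), List.getElem_map]
  by_cases hc : single_tokens.contains words[i]
  · rw [if_pos hc, if_pos hc]
  · rw [if_neg hc, if_neg hc]

-- B's chain walk over the table retraces A's greedy loop step for step
theorem walk_eq (words single_tokens : List String) (ps : List (List String)) :
    ∀ (fuel i : Nat) (acc : List String), words.length - i < fuel →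
      bWalk (bTable words single_tokens ps) i acc fuel = aLoop words single_tokens ps i acc := by
  intro fuel
  induction fuel with
  | zero => intro i acc h; omega
  | succ m ih =>
    intro i acc h
    rw [bWalk, aLoop]
    by_cases hi : i < words.length
    · rw [if_pos (by rw [bTable_length]; exact hi), dif_pos hi, bTable_getD words single_tokens ps i hi]
      simp only
      by_cases hc : single_tokens.contains words[i]
      · rw [if_pos hc, if_pos hc]
        exact ih (i + 1) (acc ++ [words[i]]) (by omega)
      · rw [if_neg hc, if_neg hc]
        cases hm : aFindPhrase words i ps with
        | none => rfl
        | some p =>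
          have := aFindPhrase_some_len hm
          exact ih (i + p.length) (acc ++ [PySem.Str.join " " p]) (by omega)
    · rw [if_neg (by rw [bTable_length]; exact hi), dif_neg hi]

-- ===== VERDICT (by name: the statement is the Claim_ definition above) =====
theorem can_be_composed_of_keywords_spec : Claim_equal_can_be_composed_of_keywords := by
  intro words single_tokens phrase_sequences _
  unfold Spec_can_be_composed_of_keywords can_be_composed_of_keywords can_be_composed_of_keywords_alt
  rw [walk_eq words single_tokens phrase_sequences (words.length + 1) 0 [] (by omega)]
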